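-- pv_equiv track=rewrite | github.com/lemontheme/trefwurd | trefwurd/bpe.py | bigram_counts_deltas
-- ===== SOURCE A (Python) =====
-- from operator import neg
--
-- def bigram_counts_deltas(old_counts, new_counts):
--     deltas = {}
--     for count_key in old_counts.keys() | new_counts.keys():
--         old_count = old_counts.get(count_key)
--         new_count = new_counts.get(count_key)
--         if old_count is None:
--             deltas[count_key] = new_counts[count_key]
--         elif new_count is None:
--             deltas[count_key] = neg(old_count)
--         else:
--             deltas[count_key] = new_count - old_count
--     return deltas
-- ===== SOURCE B (Python) =====
-- def bigram_counts_deltas(old_counts, new_counts):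
--     old_items = sorted(old_counts.items(), key=lambda kv: kv[0])
--     new_items = sorted(new_counts.items(), key=lambda kv: kv[0])
--     deltas = {}
--     i, j = 0, 0
--     while i < len(old_items) and j < len(new_items):
--         (ok, ov), (nk, nv) = old_items[i], new_items[j]
--         if ok < nk:
--             deltas[ok] = -ov
--             i += 1
--         elif nk < ok:
--             deltas[nk] = nv
--             j += 1
--         else:
--             deltas[ok] = nv - ov
--             i += 1
--             j += 1
--     while i < len(old_items):
--         k, v = old_items[i]
--         deltas[k] = -v
--         i += 1
--     while j < len(new_items):
--         k, v = new_items[j]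
--         deltas[k] = v
--         j += 1
--     return deltas
-- ===== Notes on version B (the rewrite author's own statement) =====
-- stated objective: alternative
-- what changed: B replaces A's hash-based pass over the key-union set (with a three-way None branch per key) by a sort-and-merge algorithm: it sorts both item lists by key and classifies shared/old-only/new-only keys with a two-pointer merge, never materializing the key union or probing either dict.
import Mathlib
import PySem

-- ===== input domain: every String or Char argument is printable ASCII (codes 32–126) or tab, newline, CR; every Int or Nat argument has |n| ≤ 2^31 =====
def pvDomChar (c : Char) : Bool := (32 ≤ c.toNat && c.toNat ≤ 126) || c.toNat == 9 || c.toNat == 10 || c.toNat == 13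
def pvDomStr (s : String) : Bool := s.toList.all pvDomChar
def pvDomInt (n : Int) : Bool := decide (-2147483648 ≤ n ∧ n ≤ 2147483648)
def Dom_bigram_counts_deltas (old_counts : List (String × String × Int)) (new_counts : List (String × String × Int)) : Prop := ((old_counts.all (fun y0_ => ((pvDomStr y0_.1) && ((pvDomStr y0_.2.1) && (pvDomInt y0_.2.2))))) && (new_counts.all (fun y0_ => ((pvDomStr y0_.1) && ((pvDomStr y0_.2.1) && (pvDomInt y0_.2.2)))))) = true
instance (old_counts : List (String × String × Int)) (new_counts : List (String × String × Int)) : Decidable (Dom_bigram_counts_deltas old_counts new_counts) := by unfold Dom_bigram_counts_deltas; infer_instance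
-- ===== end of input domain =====

-- B replaces A's pass over the hash key-union set (three-way None branch per key) by a
-- sort-and-merge: both item lists are sorted by key and classified by a two-pointer merge
-- (objective: alternative; not faster). Both Pythons return a dict — dicts are compared
-- ignoring order, and each port fixes one concrete order for what Python leaves unordered
-- (A's set iteration).


-- key of an entry of the association list representing the Python dict {(str, str): int}
def pvKey (e : String × String × Int) : String × String := (e.1, e.2.1)

-- the association list as a PySem.Dict keyed by the bigram pair
def pvToDict (xs : List (String × String × Int)) : PySem.Dict (String × String) Int :=
  PySem.Dict.mk (xs.map (fun e => (pvKey e, e.2.2)))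

-- ===== PORT A =====
def bigram_counts_deltas (old_counts : List (String × String × Int)) (new_counts : List (String × String × Int)) : List (String × String × Int) :=
  let od := pvToDict old_counts
  let nd := pvToDict new_counts
  -- 'old_counts.keys() | new_counts.keys()': Python iterates this SET in unspecified hash
  -- order; the port fixes one canonical iteration order (sorted) for the same set of keys —
  -- the resulting dict is the same dict (dict outputs are compared ignoring order).
  let keyset := PySem.List.sorted (PySem.Set.union (PySem.Set.ofList od.keys) nd.keys) (fun k => toLex k)
  let deltas := keyset.foldl (fun deltas count_key =>
    match od.get? count_key with
    | none =>
        -- new_counts[count_key]: the key is in the union but not in old, hence in new; getD is exact here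
        deltas.insert count_key (nd.getD count_key 0)
    | some old_count =>
        match nd.get? count_key with
        | none => deltas.insert count_key (-old_count)
        | some new_count => deltas.insert count_key (new_count - old_count)) PySem.Dict.empty
  deltas.items.map (fun p => (p.1.1, p.1.2, p.2))

-- ===== PORT B =====
-- B's index-based while loop, transcribed as the obvious recursion on the two remaining
-- suffixes (the two trailing while loops are the base cases' folds); Python's '<' on
-- (str, str) key tuples is the lexicographic order, i.e. '<' on 'toLex' of the pair.
def pvMergeLoop : List (String × String × Int) → List (String × String × Int) → PySem.Dict (String × String) Int → PySem.Dict (String × String) Int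
  | [], new_items, deltas => new_items.foldl (fun d e => d.insert (pvKey e) e.2.2) deltas
  | o :: old_items, [], deltas => (o :: old_items).foldl (fun d e => d.insert (pvKey e) (-e.2.2)) deltas
  | o :: old_items, n :: new_items, deltas =>
    if toLex (pvKey o) < toLex (pvKey n) then
      pvMergeLoop old_items (n :: new_items) (deltas.insert (pvKey o) (-o.2.2))
    else if toLex (pvKey n) < toLex (pvKey o) then
      pvMergeLoop (o :: old_items) new_items (deltas.insert (pvKey n) n.2.2)
    else
      pvMergeLoop old_items new_items (deltas.insert (pvKey o) (n.2.2 - o.2.2))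
  termination_by os ns _ => os.length + ns.length

def bigram_counts_deltas_alt (old_counts : List (String × String × Int)) (new_counts : List (String × String × Int)) : List (String × String × Int) :=
  -- sorted(d.items(), key=lambda kv: kv[0]): kv[0] is the (str, str) key pair, compared lexicographically
  let old_items := PySem.List.sorted old_counts (fun e => toLex (pvKey e))
  let new_items := PySem.List.sorted new_counts (fun e => toLex (pvKey e))
  (pvMergeLoop old_items new_items PySem.Dict.empty).items.map (fun p => (p.1.1, p.1.2, p.2))

-- ===== PRECONDITION & SPEC =====
-- Pre_ excludes association lists with a duplicated key: those do not represent a Python dict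
-- (the list→dict conversion collapses duplicates keeping the LAST value, while the assoc-list
-- ports look up the FIRST match), so nothing faithful can be claimed there.
def Pre_bigram_counts_deltas (old_counts : List (String × String × Int)) (new_counts : List (String × String × Int)) : Prop :=
  (old_counts.map pvKey).Nodup ∧ (new_counts.map pvKey).Nodup
instance (old_counts : List (String × String × Int)) (new_counts : List (String × String × Int)) : Decidable (Pre_bigram_counts_deltas old_counts new_counts) := by unfold Pre_bigram_counts_deltas; infer_instance

def pvWitness_bigram_counts_deltas : (List (String × String × Int)) × (List (String × String × Int)) :=
  ([("a", "b", 1), ("c", "d", 4)], [("a", "b", 3), ("e", "f", 2)])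

def Spec_bigram_counts_deltas (old_counts : List (String × String × Int)) (new_counts : List (String × String × Int)) (out : List (String × String × Int)) : Prop := out = bigram_counts_deltas_alt old_counts new_counts
instance (old_counts : List (String × String × Int)) (new_counts : List (String × String × Int)) (out : List (String × String × Int)) : Decidable (Spec_bigram_counts_deltas old_counts new_counts out) := by unfold Spec_bigram_counts_deltas; infer_instance

-- ===== CLAIM =====
def Claim_equal_bigram_counts_deltas : Prop := ∀ (old_counts : List (String × String × Int)) (new_counts : List (String × String × Int)), Dom_bigram_counts_deltas old_counts new_counts → Pre_bigram_counts_deltas old_counts new_counts → Spec_bigram_counts_deltas old_counts new_counts (bigram_counts_deltas old_counts new_counts)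

-- ===== LEMMAS AND PROOFS =====

-- the delta value at key k, read off the two association lists by first-match lookup
def pvF (l1 l2 : List (String × String × Int)) (k : String × String) : Int :=
  match l1.find? (fun e => pvKey e == k), l2.find? (fun e => pvKey e == k) with
  | some o, some n => n.2.2 - o.2.2
  | some o, none => -o.2.2
  | none, some n => n.2.2
  | none, none => 0

-- the pure merge list: what pvMergeLoop appends to its accumulator dict
def pvM : List (String × String × Int) → List (String × String × Int) → List ((String × String) × Int)
  | [], ns => ns.map (fun e => (pvKey e, e.2.2))
  | o :: os, [] => (o :: os).map (fun e => (pvKey e, -e.2.2))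
  | o :: os, n :: ns =>
    if toLex (pvKey o) < toLex (pvKey n) then (pvKey o, -o.2.2) :: pvM os (n :: ns)
    else if toLex (pvKey n) < toLex (pvKey o) then (pvKey n, n.2.2) :: pvM (o :: os) ns
    else (pvKey o, n.2.2 - o.2.2) :: pvM os ns
  termination_by os ns => os.length + ns.length

lemma pvM_nil_left (ns : List (String × String × Int)) :
    pvM [] ns = ns.map (fun e => (pvKey e, e.2.2)) := by
  simp only [pvM]

lemma pvM_cons_nil (o : String × String × Int) (os : List (String × String × Int)) :
    pvM (o :: os) [] = (o :: os).map (fun e => (pvKey e, -e.2.2)) := by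
  simp only [pvM]

lemma get?_pvToDict (xs : List (String × String × Int)) (k : String × String) :
    (pvToDict xs).get? k = (xs.find? (fun e => pvKey e == k)).map (fun e => e.2.2) := by
  simp [pvToDict, PySem.Dict.get?, List.find?_map, Option.map_map, Function.comp_def]

lemma keys_pvToDict (xs : List (String × String × Int)) :
    (pvToDict xs).keys = xs.map pvKey := by
  simp [pvToDict, PySem.Dict.keys, Function.comp_def]

-- key-nodup of a list ↔ pairwise key-distinct
lemma nodup_map_key_iff {β : Type} (g : β → String × String) (l : List β) :
    (l.map g).Nodup ↔ l.Pairwise (fun a b => g a ≠ g b) := by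
  exact List.pairwise_map

-- pairwise ≤ on keys plus key-nodup gives pairwise < on keys
lemma pairwise_lt_of_le_of_ne {β : Type} (g : β → String × String) (l : List β)
    (h1 : l.Pairwise (fun a b => toLex (g a) ≤ toLex (g b)))
    (h2 : l.Pairwise (fun a b => g a ≠ g b)) :
    l.Pairwise (fun a b => toLex (g a) < toLex (g b)) :=
  (h1.and h2).imp (fun h => lt_of_le_of_ne h.1 (by simpa using h.2))

-- first-match lookup is invariant under permutation when keys are unique
lemma find?_key_eq_of_perm (l l' : List (String × String × Int))
    (hp : l.Perm l') (hnd : (l.map pvKey).Nodup) (k : String × String) :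
    l.find? (fun e => pvKey e == k) = l'.find? (fun e => pvKey e == k) := by
  cases h1 : l.find? (fun e => pvKey e == k) with
  | none =>
    cases h2 : l'.find? (fun e => pvKey e == k) with
    | none => rfl
    | some e =>
      exact absurd (List.find?_some h2)
        (List.find?_eq_none.mp h1 e (hp.mem_iff.mpr (List.mem_of_find?_eq_some h2)))
  | some e =>
    cases h2 : l'.find? (fun e => pvKey e == k) with
    | none =>
      exact absurd (List.find?_some h1)
        (List.find?_eq_none.mp h2 e (hp.mem_iff.mp (List.mem_of_find?_eq_some h1)))
    | some e' =>
      have he : e ∈ l := List.mem_of_find?_eq_some h1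
      have he' : e' ∈ l := hp.mem_iff.mpr (List.mem_of_find?_eq_some h2)
      have hk1 : pvKey e = k := by simpa using List.find?_some h1
      have hk2 : pvKey e' = k := by simpa using List.find?_some h2
      rw [List.inj_on_of_nodup_map hnd he he' (hk1.trans hk2.symm)]

-- a key-nodup list's first match at one of its own keys is that element
lemma find?_key_self (l : List (String × String × Int)) (q : String × String × Int)
    (hnd : (l.map pvKey).Nodup) (hq : q ∈ l) :
    l.find? (fun e => pvKey e == pvKey q) = some q := by
  induction l with
  | nil => cases hq
  | cons e t ih =>
    rw [List.map_cons] at hnd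
    rcases List.nodup_cons.mp hnd with ⟨he, hnd'⟩
    rcases List.mem_cons.mp hq with rfl | hq'
    · simp
    · have hne : pvKey e ≠ pvKey q := fun h => he (h ▸ List.mem_map_of_mem hq')
      simp only [List.find?_cons]
      have : (pvKey e == pvKey q) = false := by simp [hne]
      rw [this]
      exact ih hnd' hq'

lemma pvF_cons_left (o : String × String × Int) (os l2 : List (String × String × Int))
    (k : String × String) (h : pvKey o ≠ k) : pvF (o :: os) l2 k = pvF os l2 k := by
  unfold pvF
  rw [List.find?_cons_of_neg (by simpa using h)]

lemma pvF_cons_right (l1 : List (String × String × Int)) (n : String × String × Int)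
    (ns : List (String × String × Int)) (k : String × String) (h : pvKey n ≠ k) :
    pvF l1 (n :: ns) k = pvF l1 ns k := by
  unfold pvF
  rw [List.find?_cons_of_neg (by simpa using h)]

-- keys of the merge list = union of the two key lists
lemma pvM_keys_mem (os ns : List (String × String × Int)) (k : String × String) :
    k ∈ (pvM os ns).map Prod.fst ↔ k ∈ os.map pvKey ∨ k ∈ ns.map pvKey := by
  induction os, ns using pvM.induct with
  | case1 ns => simp [pvM, List.map_map, Function.comp_def]
  | case2 o os => simp [pvM, List.map_map, Function.comp_def]
  | case3 o os n ns h ih =>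
    simp only [pvM, if_pos h, List.map_cons, List.mem_cons, ih]
    tauto
  | case4 o os n ns h h' ih =>
    simp only [pvM, if_neg h, if_pos h', List.map_cons, List.mem_cons, ih]
    tauto
  | case5 o os n ns h h' ih =>
    have hkey : pvKey o = pvKey n := by
      have := le_antisymm (not_lt.mp h') (not_lt.mp h)
      simpa using this
    simp only [pvM, if_neg h, if_neg h', List.map_cons, List.mem_cons, ih]
    rw [hkey]
    tauto

-- every key of the merge list is above any common strict lower bound of the inputs' keys
lemma pvM_lb (os ns : List (String × String × Int)) (L : Lex (String × String))
    (hos : ∀ e ∈ os, L < toLex (pvKey e)) (hns : ∀ e ∈ ns, L < toLex (pvKey e)) :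
    ∀ p ∈ pvM os ns, L < toLex p.1 := by
  intro p hpmem
  have h1 : p.1 ∈ (pvM os ns).map Prod.fst := List.mem_map_of_mem hpmem
  rcases (pvM_keys_mem os ns p.1).mp h1 with h | h <;>
    · rcases List.mem_map.mp h with ⟨e, he, hek⟩
      first
      | exact hek ▸ hos e he
      | exact hek ▸ hns e he

-- merging two strictly key-sorted lists yields a strictly key-sorted list
lemma pvM_pairwise (os ns : List (String × String × Int))
    (hos : os.Pairwise (fun a b => toLex (pvKey a) < toLex (pvKey b)))
    (hns : ns.Pairwise (fun a b => toLex (pvKey a) < toLex (pvKey b))) :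
    (pvM os ns).Pairwise (fun p q => toLex p.1 < toLex q.1) := by
  induction os, ns using pvM.induct with
  | case1 ns =>
    rw [pvM_nil_left]
    exact List.pairwise_map.mpr hns
  | case2 o os =>
    rw [pvM_cons_nil]
    exact List.pairwise_map.mpr hos
  | case3 o os n ns h ih =>
    rcases List.pairwise_cons.mp hos with ⟨hob, hos'⟩
    simp only [pvM, if_pos h, List.pairwise_cons]
    refine ⟨pvM_lb _ _ _ hob ?_, ih hos' hns⟩
    intro e he
    rcases List.mem_cons.mp he with rfl | he'
    · exact h
    · exact h.trans ((List.pairwise_cons.mp hns).1 e he')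
  | case4 o os n ns h h' ih =>
    rcases List.pairwise_cons.mp hns with ⟨hnb, hns'⟩
    simp only [pvM, if_neg h, if_pos h', List.pairwise_cons]
    refine ⟨pvM_lb _ _ _ ?_ hnb, ih hos hns'⟩
    intro e he
    rcases List.mem_cons.mp he with rfl | he'
    · exact h'
    · exact h'.trans ((List.pairwise_cons.mp hos).1 e he')
  | case5 o os n ns h h' ih =>
    rcases List.pairwise_cons.mp hos with ⟨hob, hos'⟩
    rcases List.pairwise_cons.mp hns with ⟨hnb, hns'⟩
    have heq : toLex (pvKey o) = toLex (pvKey n) := le_antisymm (not_lt.mp h') (not_lt.mp h)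
    simp only [pvM, if_neg h, if_neg h', List.pairwise_cons]
    refine ⟨pvM_lb _ _ _ hob ?_, ih hos' hns'⟩
    intro e he
    exact heq ▸ hnb e he

-- each merged value is the first-match delta of its key over the two (suffix) lists
lemma pvM_val (os ns : List (String × String × Int))
    (hos : os.Pairwise (fun a b => toLex (pvKey a) < toLex (pvKey b)))
    (hns : ns.Pairwise (fun a b => toLex (pvKey a) < toLex (pvKey b))) :
    ∀ p ∈ pvM os ns, p.2 = pvF os ns p.1 := by
  induction os, ns using pvM.induct with
  | case1 ns =>
    intro p hp
    rw [pvM_nil_left] at hp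
    rcases List.mem_map.mp hp with ⟨e, he, rfl⟩
    have hnd : (ns.map pvKey).Nodup :=
      (nodup_map_key_iff pvKey ns).mpr (hns.imp fun h => by simpa using ne_of_lt h)
    unfold pvF
    rw [find?_key_self ns e hnd he]
    rfl
  | case2 o os =>
    intro p hp
    rw [pvM_cons_nil] at hp
    rcases List.mem_map.mp hp with ⟨e, he, rfl⟩
    have hnd : ((o :: os).map pvKey).Nodup :=
      (nodup_map_key_iff pvKey (o :: os)).mpr (hos.imp fun h => by simpa using ne_of_lt h)
    unfold pvF
    rw [find?_key_self (o :: os) e hnd he]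
    rfl
  | case3 o os n ns h ih =>
    rcases List.pairwise_cons.mp hos with ⟨hob, hos'⟩
    have hbound : ∀ e ∈ n :: ns, toLex (pvKey o) < toLex (pvKey e) := by
      intro e he
      rcases List.mem_cons.mp he with rfl | he'
      · exact h
      · exact h.trans ((List.pairwise_cons.mp hns).1 e he')
    intro p hp
    rw [show pvM (o :: os) (n :: ns) = (pvKey o, -o.2.2) :: pvM os (n :: ns) from by
      simp only [pvM, if_pos h]] at hp
    rcases List.mem_cons.mp hp with rfl | hp'
    · unfold pvF
      rw [List.find?_cons_of_pos (a := o) (l := os) (by simp),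
        List.find?_eq_none.mpr (fun e he hbe =>
          ne_of_lt (hbound e he) (congrArg toLex (eq_of_beq hbe).symm))]
    · have hgt := pvM_lb os (n :: ns) (toLex (pvKey o)) hob hbound p hp'
      rw [pvF_cons_left o os (n :: ns) p.1 (fun he => absurd (he ▸ hgt) (lt_irrefl _))]
      exact ih hos' hns p hp'
  | case4 o os n ns h h' ih =>
    rcases List.pairwise_cons.mp hns with ⟨hnb, hns'⟩
    have hbound : ∀ e ∈ o :: os, toLex (pvKey n) < toLex (pvKey e) := by
      intro e he
      rcases List.mem_cons.mp he with rfl | he'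
      · exact h'
      · exact h'.trans ((List.pairwise_cons.mp hos).1 e he')
    intro p hp
    rw [show pvM (o :: os) (n :: ns) = (pvKey n, n.2.2) :: pvM (o :: os) ns from by
      simp only [pvM, if_neg h, if_pos h']] at hp
    rcases List.mem_cons.mp hp with rfl | hp'
    · unfold pvF
      rw [List.find?_eq_none.mpr (fun e he hbe =>
          ne_of_lt (hbound e he) (congrArg toLex (eq_of_beq hbe).symm)),
        List.find?_cons_of_pos (a := n) (l := ns) (by simp)]
    · have hgt := pvM_lb (o :: os) ns (toLex (pvKey n)) hbound hnb p hp'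
      rw [pvF_cons_right (o :: os) n ns p.1 (fun he => absurd (he ▸ hgt) (lt_irrefl _))]
      exact ih hos hns' p hp'
  | case5 o os n ns h h' ih =>
    rcases List.pairwise_cons.mp hos with ⟨hob, hos'⟩
    rcases List.pairwise_cons.mp hns with ⟨hnb, hns'⟩
    have hkey : pvKey o = pvKey n := by
      have := le_antisymm (not_lt.mp h') (not_lt.mp h)
      simpa using this
    intro p hp
    rw [show pvM (o :: os) (n :: ns) = (pvKey o, n.2.2 - o.2.2) :: pvM os ns from by
      simp only [pvM, if_neg h, if_neg h']] at hp
    rcases List.mem_cons.mp hp with rfl | hp'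
    · unfold pvF
      rw [List.find?_cons_of_pos (a := o) (l := os) (by simp),
        List.find?_cons_of_pos (a := n) (l := ns) (by simp [hkey])]
    · have hgt := pvM_lb os ns (toLex (pvKey o)) hob (fun e he => hkey ▸ hnb e he) p hp'
      have hne : pvKey o ≠ p.1 := fun he => absurd (he ▸ hgt) (lt_irrefl _)
      rw [pvF_cons_left o os (n :: ns) p.1 hne, pvF_cons_right os n ns p.1 (hkey ▸ hne)]
      exact ih hos' hns' p hp'

-- the merge loop appends exactly the pure merge list when its keys are fresh and distinct
lemma pvMergeLoop_items (os ns : List (String × String × Int)) :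
    ∀ d : PySem.Dict (String × String) Int,
      (∀ k ∈ (pvM os ns).map Prod.fst, d.contains k = false) →
      ((pvM os ns).map Prod.fst).Nodup →
      (pvMergeLoop os ns d).items = d.items ++ pvM os ns := by
  induction os, ns using pvM.induct with
  | case1 ns =>
    intro d hf hnd
    have hf' : ∀ e ∈ ns, d.contains (pvKey e) = false := fun e he =>
      hf (pvKey e) (by rw [pvM_nil_left]; exact List.mem_map_of_mem (List.mem_map_of_mem he))
    have hnd' : (ns.map pvKey).Nodup := by
      rw [pvM_nil_left, List.map_map] at hnd
      exact hnd
    rw [show pvMergeLoop [] ns d = ns.foldl (fun d e => d.insert (pvKey e) e.2.2) d from by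
        simp only [pvMergeLoop],
      PySem.Dict.items_foldl_insert_fresh ns pvKey (fun e => e.2.2) d hf' hnd', pvM_nil_left]
  | case2 o os =>
    intro d hf hnd
    have hf' : ∀ e ∈ o :: os, d.contains (pvKey e) = false := fun e he =>
      hf (pvKey e) (by rw [pvM_cons_nil]; exact List.mem_map_of_mem (List.mem_map_of_mem he))
    have hnd' : ((o :: os).map pvKey).Nodup := by
      rw [pvM_cons_nil, List.map_map] at hnd
      exact hnd
    rw [show pvMergeLoop (o :: os) [] d = (o :: os).foldl (fun d e => d.insert (pvKey e) (-e.2.2)) d from by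
        simp only [pvMergeLoop],
      PySem.Dict.items_foldl_insert_fresh (o :: os) pvKey (fun e => -e.2.2) d hf' hnd', pvM_cons_nil]
  | case3 o os n ns h ih =>
    intro d hf hnd
    rw [show pvM (o :: os) (n :: ns) = (pvKey o, -o.2.2) :: pvM os (n :: ns) from by
      simp only [pvM, if_pos h]] at hf hnd ⊢
    rw [List.map_cons] at hf hnd
    rcases List.nodup_cons.mp hnd with ⟨hhead, hnd'⟩
    have hc : d.contains (pvKey o) = false := hf _ List.mem_cons_self
    have hstep : pvMergeLoop (o :: os) (n :: ns) d
        = pvMergeLoop os (n :: ns) (d.insert (pvKey o) (-o.2.2)) := by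
      simp only [pvMergeLoop, if_pos h]
    rw [hstep, ih _ (fun k hk => ?_) hnd',
      PySem.Dict.items_insert_of_not_contains d _ hc, List.append_assoc, List.singleton_append]
    rw [PySem.Dict.contains_insert]
    have : (k == pvKey o) = false := by
      simp only [beq_eq_false_iff_ne]
      exact fun he => hhead (he ▸ hk)
    rw [this, hf k (List.mem_cons_of_mem _ hk)]
    rfl
  | case4 o os n ns h h' ih =>
    intro d hf hnd
    rw [show pvM (o :: os) (n :: ns) = (pvKey n, n.2.2) :: pvM (o :: os) ns from by
      simp only [pvM, if_neg h, if_pos h']] at hf hnd ⊢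
    rw [List.map_cons] at hf hnd
    rcases List.nodup_cons.mp hnd with ⟨hhead, hnd'⟩
    have hc : d.contains (pvKey n) = false := hf _ List.mem_cons_self
    have hstep : pvMergeLoop (o :: os) (n :: ns) d
        = pvMergeLoop (o :: os) ns (d.insert (pvKey n) n.2.2) := by
      simp only [pvMergeLoop, if_neg h, if_pos h']
    rw [hstep, ih _ (fun k hk => ?_) hnd',
      PySem.Dict.items_insert_of_not_contains d _ hc, List.append_assoc, List.singleton_append]
    rw [PySem.Dict.contains_insert]
    have : (k == pvKey n) = false := by
      simp only [beq_eq_false_iff_ne]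
      exact fun he => hhead (he ▸ hk)
    rw [this, hf k (List.mem_cons_of_mem _ hk)]
    rfl
  | case5 o os n ns h h' ih =>
    intro d hf hnd
    rw [show pvM (o :: os) (n :: ns) = (pvKey o, n.2.2 - o.2.2) :: pvM os ns from by
      simp only [pvM, if_neg h, if_neg h']] at hf hnd ⊢
    rw [List.map_cons] at hf hnd
    rcases List.nodup_cons.mp hnd with ⟨hhead, hnd'⟩
    have hc : d.contains (pvKey o) = false := hf _ List.mem_cons_self
    have hstep : pvMergeLoop (o :: os) (n :: ns) d
        = pvMergeLoop os ns (d.insert (pvKey o) (n.2.2 - o.2.2)) := by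
      simp only [pvMergeLoop, if_neg h, if_neg h']
    rw [hstep, ih _ (fun k hk => ?_) hnd',
      PySem.Dict.items_insert_of_not_contains d _ hc, List.append_assoc, List.singleton_append]
    rw [PySem.Dict.contains_insert]
    have : (k == pvKey o) = false := by
      simp only [beq_eq_false_iff_ne]
      exact fun he => hhead (he ▸ hk)
    rw [this, hf k (List.mem_cons_of_mem _ hk)]
    rfl

-- the two delta dicts have identical item lists
lemma items_eq (old_counts new_counts : List (String × String × Int))
    (ho : (old_counts.map pvKey).Nodup) (hn : (new_counts.map pvKey).Nodup) :
    ((PySem.List.sorted (PySem.Set.union (PySem.Set.ofList (pvToDict old_counts).keys) (pvToDict new_counts).keys) (fun k => toLex k)).foldl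
      (fun deltas count_key =>
        match (pvToDict old_counts).get? count_key with
        | none => deltas.insert count_key ((pvToDict new_counts).getD count_key 0)
        | some old_count =>
          match (pvToDict new_counts).get? count_key with
          | none => deltas.insert count_key (-old_count)
          | some new_count => deltas.insert count_key (new_count - old_count)) PySem.Dict.empty).items
    = (pvMergeLoop (PySem.List.sorted old_counts (fun e => toLex (pvKey e)))
        (PySem.List.sorted new_counts (fun e => toLex (pvKey e))) PySem.Dict.empty).items := by
  -- abbreviations
  set sOld := PySem.List.sorted old_counts (fun e => toLex (pvKey e)) with hsOld
  set sNew := PySem.List.sorted new_counts (fun e => toLex (pvKey e)) with hsNew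
  set U := PySem.Set.union (PySem.Set.ofList (pvToDict old_counts).keys) (pvToDict new_counts).keys with hU
  set kset := PySem.List.sorted U (fun k => toLex k) with hkset
  -- facts about the sorted key set
  have hUnd : U.Nodup := PySem.Set.nodup_union _ _ (PySem.Set.nodup_ofList _)
  have hksetperm : kset.Perm U := PySem.List.sorted_perm U _ false
  have hksetnd : kset.Nodup := hksetperm.nodup_iff.mpr hUnd
  have hksetlt : kset.Pairwise (fun a b => toLex a < toLex b) :=
    pairwise_lt_of_le_of_ne (fun k => k) kset (PySem.List.sorted_pairwise U _) hksetnd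
  have hmemkset : ∀ k, k ∈ kset ↔ k ∈ old_counts.map pvKey ∨ k ∈ new_counts.map pvKey := by
    intro k
    rw [hkset, PySem.List.mem_sorted, hU, PySem.Set.mem_union, PySem.Set.mem_ofList,
      keys_pvToDict, keys_pvToDict]
  -- facts about the sorted item lists
  have hsOldperm : sOld.Perm old_counts := PySem.List.sorted_perm old_counts _ false
  have hsNewperm : sNew.Perm new_counts := PySem.List.sorted_perm new_counts _ false
  have hsOldnd : (sOld.map pvKey).Nodup := ((hsOldperm.map pvKey).nodup_iff).mpr ho
  have hsNewnd : (sNew.map pvKey).Nodup := ((hsNewperm.map pvKey).nodup_iff).mpr hn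
  have hsOldlt : sOld.Pairwise (fun a b => toLex (pvKey a) < toLex (pvKey b)) :=
    pairwise_lt_of_le_of_ne pvKey sOld (PySem.List.sorted_pairwise old_counts _)
      ((nodup_map_key_iff pvKey sOld).mp hsOldnd)
  have hsNewlt : sNew.Pairwise (fun a b => toLex (pvKey a) < toLex (pvKey b)) :=
    pairwise_lt_of_le_of_ne pvKey sNew (PySem.List.sorted_pairwise new_counts _)
      ((nodup_map_key_iff pvKey sNew).mp hsNewnd)
  -- the delta lookups are permutation-invariant
  have hpvF : ∀ k, pvF sOld sNew k = pvF old_counts new_counts k := by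
    intro k
    unfold pvF
    rw [find?_key_eq_of_perm old_counts sOld hsOldperm.symm ho k,
      find?_key_eq_of_perm new_counts sNew hsNewperm.symm hn k]
  -- A's fold body inserts exactly pvF old new
  have hbody : (fun (deltas : PySem.Dict (String × String) Int) count_key =>
      match (pvToDict old_counts).get? count_key with
      | none => deltas.insert count_key ((pvToDict new_counts).getD count_key 0)
      | some old_count =>
        match (pvToDict new_counts).get? count_key with
        | none => deltas.insert count_key (-old_count)
        | some new_count => deltas.insert count_key (new_count - old_count))
      = fun deltas count_key => deltas.insert count_key (pvF old_counts new_counts count_key) := by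
    funext d k
    unfold pvF
    rw [get?_pvToDict, get?_pvToDict, PySem.Dict.getD_eq_get?_getD, get?_pvToDict]
    cases old_counts.find? (fun e => pvKey e == k) with
    | none => cases new_counts.find? (fun e => pvKey e == k) with
      | none => rfl
      | some n => rfl
    | some o => cases new_counts.find? (fun e => pvKey e == k) with
      | none => rfl
      | some n => rfl
  -- A's items: the key set mapped through the delta function
  have hitemsA : ∀ dA : _, dA = (kset.foldl
      (fun (deltas : PySem.Dict (String × String) Int) count_key =>
        match (pvToDict old_counts).get? count_key with
        | none => deltas.insert count_key ((pvToDict new_counts).getD count_key 0)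
        | some old_count =>
          match (pvToDict new_counts).get? count_key with
          | none => deltas.insert count_key (-old_count)
          | some new_count => deltas.insert count_key (new_count - old_count)) PySem.Dict.empty).items
      → dA = kset.map (fun k => (k, pvF old_counts new_counts k)) := by
    intro dA hdA
    rw [hdA, hbody,
      PySem.Dict.items_foldl_insert_fresh kset (fun k => k) (fun k => pvF old_counts new_counts k)
        PySem.Dict.empty (fun a _ => PySem.Dict.contains_empty a) (by simpa using hksetnd)]
    rfl
  -- B's items: the pure merge list
  have hMlt : (pvM sOld sNew).Pairwise (fun p q => toLex p.1 < toLex q.1) :=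
    pvM_pairwise sOld sNew hsOldlt hsNewlt
  have hMkeysnd : ((pvM sOld sNew).map Prod.fst).Nodup :=
    (nodup_map_key_iff Prod.fst (pvM sOld sNew)).mpr (hMlt.imp fun h => by simpa using ne_of_lt h)
  have hitemsB : (pvMergeLoop sOld sNew PySem.Dict.empty).items = pvM sOld sNew := by
    rw [pvMergeLoop_items sOld sNew PySem.Dict.empty
      (fun k _ => PySem.Dict.contains_empty k) hMkeysnd]
    rfl
  -- the two lists are equal: same members, both strictly key-sorted
  have hlistAlt : (kset.map (fun k => (k, pvF old_counts new_counts k))).Pairwise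
      (fun p q => toLex p.1 < toLex q.1) := List.pairwise_map.mpr hksetlt
  have hlistAnd : (kset.map (fun k => (k, pvF old_counts new_counts k))).Nodup :=
    List.Pairwise.imp (fun h => fun he => absurd (he ▸ h) (lt_irrefl _)) hlistAlt
  have hMnd : (pvM sOld sNew).Nodup :=
    List.Pairwise.imp (fun h => fun he => absurd (he ▸ h) (lt_irrefl _)) hMlt
  have hmem : ∀ p, p ∈ pvM sOld sNew ↔ p ∈ kset.map (fun k => (k, pvF old_counts new_counts k)) := by
    intro p
    constructor
    · intro hp
      have hval : p.2 = pvF old_counts new_counts p.1 := by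
        rw [← hpvF]
        exact pvM_val sOld sNew hsOldlt hsNewlt p hp
      have hk : p.1 ∈ kset := by
        rw [hmemkset]
        rcases (pvM_keys_mem sOld sNew p.1).mp (List.mem_map_of_mem hp) with h | h
        · exact Or.inl (((hsOldperm.map pvKey).mem_iff).mp h)
        · exact Or.inr (((hsNewperm.map pvKey).mem_iff).mp h)
      have : p = (p.1, pvF old_counts new_counts p.1) := Prod.ext rfl hval
      rw [this]
      exact List.mem_map_of_mem hk
    · intro hp
      rcases List.mem_map.mp hp with ⟨k, hk, rfl⟩
      have hkM : k ∈ (pvM sOld sNew).map Prod.fst := by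
        rw [pvM_keys_mem]
        rcases (hmemkset k).mp hk with h | h
        · exact Or.inl (((hsOldperm.map pvKey).mem_iff).mpr h)
        · exact Or.inr (((hsNewperm.map pvKey).mem_iff).mpr h)
      rcases List.mem_map.mp hkM with ⟨q, hq, hqk⟩
      have hval : q.2 = pvF old_counts new_counts k := by
        rw [← hqk, ← hpvF]
        exact pvM_val sOld sNew hsOldlt hsNewlt q hq
      have : (k, pvF old_counts new_counts k) = q := by
        rw [← hval, ← hqk]
      rw [this]
      exact hq
  have hperm : (pvM sOld sNew).Perm (kset.map (fun k => (k, pvF old_counts new_counts k))) :=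
    (List.perm_ext_iff_of_nodup hMnd hlistAnd).mpr hmem
  have hfinal : kset.map (fun k => (k, pvF old_counts new_counts k)) = pvM sOld sNew := by
    have h1 := PySem.List.sorted_eq_of_perm_of_pairwise_lt
      (kset.map (fun k => (k, pvF old_counts new_counts k))) (pvM sOld sNew)
      (fun p => toLex p.1) hperm hMlt
    have h2 := PySem.List.sorted_eq_of_perm_of_pairwise_lt
      (kset.map (fun k => (k, pvF old_counts new_counts k)))
      (kset.map (fun k => (k, pvF old_counts new_counts k)))
      (fun p => toLex p.1) (List.Perm.refl _) hlistAlt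
    rw [← h1, h2]
  rw [hitemsA _ rfl, hitemsB, hfinal]

-- ===== VERDICT (by name: the statement is the Claim_ definition above) =====
theorem bigram_counts_deltas_spec : Claim_equal_bigram_counts_deltas := by
  intro old_counts new_counts _ hpre
  obtain ⟨ho, hn⟩ := hpre
  unfold Spec_bigram_counts_deltas bigram_counts_deltas bigram_counts_deltas_alt
  exact congrArg (List.map _) (items_eq old_counts new_counts ho hn)
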